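-- pv_equiv track=rewrite | github.com/JoseStud/GoodOldMeServer | ci/src/ci_pipeline/context.py | compute_ansible_tags
-- ===== SOURCE A (Python) =====
-- ROLE_PHASE_MAP: dict[str, str] = {
--     "ansible/roles/system_user/": "phase1_base",
--     "ansible/roles/storage/": "phase1_base",
--     "ansible/roles/docker/": "phase2_docker",
--     "ansible/roles/tailscale/": "phase3_tailscale",
--     "ansible/roles/glusterfs/": "phase4_glusterfs",
--     "ansible/roles/swarm/": "phase5_swarm",
--     "ansible/roles/portainer_bootstrap/": "phase6_portainer",
--     "ansible/roles/runtime_sync/": "phase7_runtime_sync",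
-- }
--
-- def compute_ansible_tags(changed_files: list[str]) -> str:
--     """Derive comma-separated phase tags from changed role paths.
--
--     Returns empty string (= full bootstrap) if any changed file is
--     outside ansible/roles/ or maps to an unrecognized role.
--     """
--     if not changed_files:
--         return ""
--
--     for f in changed_files:
--         if not f.startswith("ansible/roles/"):
--             return ""
--
--     tags: list[str] = []
--     for f in changed_files:
--         matched = False
--         for prefix, tag in ROLE_PHASE_MAP.items():
--             if f.startswith(prefix):
--                 if tag not in tags:
--                     tags.append(tag)
--                 matched = True
--                 break
--         if not matched:
--             return ""
--
--     return ",".join(tags)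
-- ===== SOURCE B (Python) =====
-- ROLE_TAG: dict[str, str] = {
--     "system_user": "phase1_base",
--     "storage": "phase1_base",
--     "docker": "phase2_docker",
--     "tailscale": "phase3_tailscale",
--     "glusterfs": "phase4_glusterfs",
--     "swarm": "phase5_swarm",
--     "portainer_bootstrap": "phase6_portainer",
--     "runtime_sync": "phase7_runtime_sync",
-- }
--
-- _ROOT = "ansible/roles/"
--
--
-- def _tag_of(f):
--     """Parse 'ansible/roles/<role>/...' and look the role name up, else None."""
--     if not f.startswith(_ROOT):
--         return None
--     rest = f[len(_ROOT):]
--     slash = rest.find("/")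
--     if slash < 0:
--         return None
--     return ROLE_TAG.get(rest[:slash])
--
--
-- def compute_ansible_tags(changed_files: list[str]) -> str:
--     if not changed_files:
--         return ""
--     tags = [_tag_of(f) for f in changed_files]
--     if None in tags:
--         return ""
--     return ",".join(dict.fromkeys(tags))
-- ===== Notes on version B (the rewrite author's own statement) =====
-- stated objective: alternative
-- what changed: B replaces A's per-file scan over the prefix map (and its separate 'ansible/roles/' pre-check loop) by parsing each path once - strip the 'ansible/roles/' root, cut at the next '/', look the role NAME up in a dict keyed by role - and builds the result in stages: map files to tags, bail on any None, then ordered-dedup with dict.fromkeys and join.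
import Mathlib
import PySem

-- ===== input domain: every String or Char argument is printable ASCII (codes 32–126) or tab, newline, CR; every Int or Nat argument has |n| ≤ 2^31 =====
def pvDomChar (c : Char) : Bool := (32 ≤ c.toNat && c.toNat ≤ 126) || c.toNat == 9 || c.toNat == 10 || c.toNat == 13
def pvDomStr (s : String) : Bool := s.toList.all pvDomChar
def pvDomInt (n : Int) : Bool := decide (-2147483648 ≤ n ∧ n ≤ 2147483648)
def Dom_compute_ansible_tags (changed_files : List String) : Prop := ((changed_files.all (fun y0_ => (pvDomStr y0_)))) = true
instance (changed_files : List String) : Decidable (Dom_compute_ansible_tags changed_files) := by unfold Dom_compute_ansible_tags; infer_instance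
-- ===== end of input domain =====

-- B replaces A's per-file scan over the prefix map (and its pre-check loop) by parsing each
-- path (strip the root, cut at the next '/', dict lookup by role NAME) and building the
-- result in stages: map files to tags, bail on any miss, ordered-dedup, join. Objective:
-- alternative (same task, different algorithm).

-- ===== PORT A =====
def rolePhaseMap : List (String × String) :=
  [("ansible/roles/system_user/", "phase1_base"),
   ("ansible/roles/storage/", "phase1_base"),
   ("ansible/roles/docker/", "phase2_docker"),
   ("ansible/roles/tailscale/", "phase3_tailscale"),
   ("ansible/roles/glusterfs/", "phase4_glusterfs"),
   ("ansible/roles/swarm/", "phase5_swarm"),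
   ("ansible/roles/portainer_bootstrap/", "phase6_portainer"),
   ("ansible/roles/runtime_sync/", "phase7_runtime_sync")]

-- A's first loop: 'for f in changed_files: if not f.startswith(...): return ""'
def aPrecheck : List String → Bool
  | [] => true
  | f :: rest => if PySem.Str.startswith f "ansible/roles/" then aPrecheck rest else false

-- A's inner 'for prefix, tag in ROLE_PHASE_MAP.items(): … break' with the matched flag
def aInner (items : List (String × String)) (f : String) (tags : List String) :
    List String × Bool :=
  match items with
  | [] => (tags, false)
  | (pfx, tag) :: rest =>
      if PySem.Str.startswith f pfx then
        ((if tags.contains tag then tags else tags ++ [tag]), true)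
      else aInner rest f tags

-- A's second loop over changed_files, ending in ",".join(tags)
def aLoop (files : List String) (tags : List String) : String :=
  match files with
  | [] => PySem.Str.join "," tags
  | f :: rest =>
      match aInner rolePhaseMap f tags with
      | (tags', matched) => if matched then aLoop rest tags' else ""

def compute_ansible_tags (changed_files : List String) : String :=
  if changed_files = [] then ""
  else if aPrecheck changed_files then aLoop changed_files [] else ""

-- ===== PORT B =====
-- Source B's ROLE_TAG dict, keyed by the role name
def roleTag : PySem.Dict String String :=
  PySem.Dict.ofList
    [("system_user", "phase1_base"),
     ("storage", "phase1_base"),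
     ("docker", "phase2_docker"),
     ("tailscale", "phase3_tailscale"),
     ("glusterfs", "phase4_glusterfs"),
     ("swarm", "phase5_swarm"),
     ("portainer_bootstrap", "phase6_portainer"),
     ("runtime_sync", "phase7_runtime_sync")]

-- Source B's _tag_of: strip "ansible/roles/" (14 chars), cut at the next '/', look the role up
def tagOf (f : String) : Option String :=
  if PySem.Str.startswith f "ansible/roles/" then
    let rest := PySem.Str.slice f (some 14) none
    let slash := PySem.Str.find rest "/"
    if slash < 0 then none
    else PySem.Dict.get? roleTag (PySem.Str.slice rest none (some slash))
  else none

def compute_ansible_tags_alt (changed_files : List String) : String :=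
  if changed_files = [] then ""
  else
    let tags := changed_files.map tagOf
    if none ∈ tags then ""
    else PySem.Str.join "," (PySem.List.dedup (tags.filterMap id))
    -- 'filterMap id' unwraps the options; exact here because 'none ∈ tags' was just ruled out,
    -- so dict.fromkeys(tags) over the (all-str) entries is the ordered dedup of the unwrapped list

-- ===== PRECONDITION & SPEC =====
def Spec_compute_ansible_tags (changed_files : List String) (out : String) : Prop := out = compute_ansible_tags_alt changed_files
instance (changed_files : List String) (out : String) : Decidable (Spec_compute_ansible_tags changed_files out) := by unfold Spec_compute_ansible_tags; infer_instance

-- ===== CLAIM (what is proved, stated in full; the proofs are below) =====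
def Claim_equal_compute_ansible_tags : Prop := ∀ (changed_files : List String), Dom_compute_ansible_tags changed_files → Spec_compute_ansible_tags changed_files (compute_ansible_tags changed_files)

-- ===== LEMMAS AND PROOFS =====

-- A's pre-check loop is an 'all' over the files.
theorem aPrecheck_eq (files : List String) :
    aPrecheck files = files.all (fun f => PySem.Str.startswith f "ansible/roles/") := by
  induction files with
  | nil => rfl
  | cons f rest ih =>
      rw [aPrecheck, ih, List.all_cons]
      cases PySem.Str.startswith f "ansible/roles/" <;> simp

-- Over '/'-free segments, 'r/' is a prefix of 'seg/…' exactly when r = seg.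
theorem seg_prefix_iff (r seg t : List Char) (hr : '/' ∉ r) (hseg : '/' ∉ seg) :
    (r ++ ['/'] <+: seg ++ '/' :: t) ↔ r = seg := by
  induction r generalizing seg with
  | nil =>
      cases seg with
      | nil => simp
      | cons b seg' =>
          simp only [List.nil_append]
          constructor
          · intro h
            have hb : '/' = b := by
              have := List.cons_prefix_cons.mp h
              exact this.1
            exact absurd (hb ▸ List.mem_cons_self) hseg
          · intro h; simp at h
  | cons a r' ih =>
      cases seg with
      | nil =>
          simp only [List.nil_append, List.cons_append, List.cons_prefix_cons]
          constructor
          · rintro ⟨rfl, -⟩; exact absurd List.mem_cons_self hr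
          · intro h; simp at h
      | cons b seg' =>
          simp only [List.cons_append, List.cons_prefix_cons]
          have hr' : '/' ∉ r' := fun h => hr (List.mem_cons_of_mem _ h)
          have hseg' : '/' ∉ seg' := fun h => hseg (List.mem_cons_of_mem _ h)
          rw [ih seg' hr' hseg']
          constructor
          · rintro ⟨rfl, rfl⟩; rfl
          · intro h; cases h; exact ⟨rfl, rfl⟩

-- A file not under "ansible/roles/" matches none of A's prefixes either.
theorem sw_mono (f p : String) (h : ("ansible/roles/" : String).toList <+: p.toList)
    (hf : PySem.Str.startswith f "ansible/roles/" = false) :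
    PySem.Str.startswith f p = false := by
  rw [PySem.Str.startswith_eq] at hf ⊢
  rw [Bool.eq_false_iff, Ne, PySem.Chars.startswith_iff] at hf ⊢
  intro hp
  exact hf (h.trans hp)


-- With the root stripped, a role prefix matches exactly when the role equals the segment
-- before the first '/' of the remainder.
theorem startswith_role (f pfx r segStr : String) (rest seg t : List Char)
    (hpfx : pfx.toList = ("ansible/roles/" : String).toList ++ r.toList ++ ['/'])
    (hr : '/' ∉ r.toList)
    (hcs : f.toList = ("ansible/roles/" : String).toList ++ rest)
    (hsplit : rest = seg ++ '/' :: t)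
    (hnos : '/' ∉ seg)
    (hseg : segStr.toList = seg) :
    PySem.Str.startswith f pfx = (r == segStr) := by
  rw [PySem.Str.startswith_eq, Bool.eq_iff_iff]
  rw [PySem.Chars.startswith_iff, beq_iff_eq]
  rw [hpfx, hcs, List.append_assoc, List.prefix_append_right_inj, hsplit,
      seg_prefix_iff _ _ _ hr hnos]
  constructor
  · intro h; apply String.toList_inj.mp; rw [h, hseg]
  · intro h; rw [h, hseg]

-- If the remainder has no '/' at all, no role prefix matches.
theorem startswith_role_nofind (f pfx r : String) (rest : List Char)
    (hpfx : pfx.toList = ("ansible/roles/" : String).toList ++ r.toList ++ ['/'])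
    (hcs : f.toList = ("ansible/roles/" : String).toList ++ rest)
    (hno : ¬ ['/'] <:+: rest) :
    PySem.Str.startswith f pfx = false := by
  rw [PySem.Str.startswith_eq, Bool.eq_false_iff, Ne]
  intro h
  have h1 : pfx.toList <+: f.toList := (PySem.Chars.startswith_iff _ _).mp h
  rw [hpfx, hcs, List.append_assoc, List.prefix_append_right_inj] at h1
  exact hno (((List.suffix_append r.toList ['/']).isInfix).trans h1.isInfix)


-- The (prefix, role, tag) triples behind both tables, used only by the proofs.
def roleTriples : List (String × String × String) :=
  [("ansible/roles/system_user/", "system_user", "phase1_base"),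
   ("ansible/roles/storage/", "storage", "phase1_base"),
   ("ansible/roles/docker/", "docker", "phase2_docker"),
   ("ansible/roles/tailscale/", "tailscale", "phase3_tailscale"),
   ("ansible/roles/glusterfs/", "glusterfs", "phase4_glusterfs"),
   ("ansible/roles/swarm/", "swarm", "phase5_swarm"),
   ("ansible/roles/portainer_bootstrap/", "portainer_bootstrap", "phase6_portainer"),
   ("ansible/roles/runtime_sync/", "runtime_sync", "phase7_runtime_sync")]

-- When each prefix test coincides with comparing the role to the parsed segment, A's
-- matched-flag scan is the dict lookup by role.
theorem chain (f segS : String) (tags : List String)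
    (l : List (String × String × String))
    (e : ∀ x ∈ l, PySem.Str.startswith f x.1 = (x.2.1 == segS)) :
    aInner (l.map (fun x => (x.1, x.2.2))) f tags =
      match Option.map (fun p => p.2) (List.find? (fun p => p.1 == segS) (l.map (fun x => x.2))) with
      | none => (tags, false)
      | some t => ((if tags.contains t then tags else tags ++ [t]), true) := by
  induction l with
  | nil => simp [aInner]
  | cons x rest ih =>
      simp only [List.map_cons, aInner, List.find?]
      rw [e x List.mem_cons_self]
      cases hb : (x.2.1 == segS)
      · simp only [Bool.false_eq_true, if_false]
        exact ih (fun y hy => e y (List.mem_cons_of_mem _ hy))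
      · simp

-- A's inner matched-flag scan over the prefix map computes exactly B's parse-and-lookup.
theorem aInner_eq_tagOf (f : String) (tags : List String) :
    aInner rolePhaseMap f tags =
      match tagOf f with
      | none => (tags, false)
      | some t => ((if tags.contains t then tags else tags ++ [t]), true) := by
  by_cases hsw : PySem.Str.startswith f "ansible/roles/" = true
  · have hp : ("ansible/roles/" : String).toList <+: f.toList := by
      rw [PySem.Str.startswith_eq] at hsw
      exact (PySem.Chars.startswith_iff _ _).mp hsw
    obtain ⟨tail, htail⟩ := hp
    have hdrop : f.toList.drop 14 = tail := by
      rw [← htail]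
      rw [show (14 : Nat) = ("ansible/roles/" : String).toList.length from rfl]
      exact List.drop_left
    have hcs : f.toList = ("ansible/roles/" : String).toList ++ f.toList.drop 14 := by
      rw [hdrop, htail]
    have hslice : PySem.List.slice f.toList (some 14) none = f.toList.drop 14 := by
      simp [pysem]
    have hrestStr : (PySem.Str.slice f (some 14) none).toList = f.toList.drop 14 := by
      simp [pysem]
    have hfind : PySem.Str.find (PySem.Str.slice f (some 14) none) "/" =
        PySem.Chars.find (f.toList.drop 14) ['/'] := by
      simp [hrestStr]
    by_cases hneg : PySem.Chars.find (f.toList.drop 14) ['/'] < 0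
    · -- no '/': B parses to none and no role prefix can match
      have hno : ¬ ['/'] <:+: f.toList.drop 14 := by
        intro h
        have h0 := (PySem.Chars.find_nonneg_iff (f.toList.drop 14) ['/']).mpr h
        omega
      have e1 := startswith_role_nofind f "ansible/roles/system_user/" "system_user" _ (by decide) hcs hno
      have e2 := startswith_role_nofind f "ansible/roles/storage/" "storage" _ (by decide) hcs hno
      have e3 := startswith_role_nofind f "ansible/roles/docker/" "docker" _ (by decide) hcs hno
      have e4 := startswith_role_nofind f "ansible/roles/tailscale/" "tailscale" _ (by decide) hcs hno
      have e5 := startswith_role_nofind f "ansible/roles/glusterfs/" "glusterfs" _ (by decide) hcs hno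
      have e6 := startswith_role_nofind f "ansible/roles/swarm/" "swarm" _ (by decide) hcs hno
      have e7 := startswith_role_nofind f "ansible/roles/portainer_bootstrap/" "portainer_bootstrap" _ (by decide) hcs hno
      have e8 := startswith_role_nofind f "ansible/roles/runtime_sync/" "runtime_sync" _ (by decide) hcs hno
      have htag : tagOf f = none := by
        simp [tagOf, hslice]
        intro _ h0
        omega
      rw [htag]
      simp only [PySem.Str.startswith_eq] at e1 e2 e3 e4 e5 e6 e7 e8
      simp at e1 e2 e3 e4 e5 e6 e7 e8
      simp [rolePhaseMap, aInner, e1, e2, e3, e4, e5, e6, e7, e8]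
    · -- '/' at index k: the segment before it decides everything
      rw [not_lt] at hneg
      obtain ⟨hpre, hmin⟩ := PySem.Chars.find_spec hneg
      set k := (PySem.Chars.find (f.toList.drop 14) ['/']).toNat with hkdef
      obtain ⟨t, ht⟩ := hpre
      have hsplit : f.toList.drop 14 = (f.toList.drop 14).take k ++ '/' :: t := by
        conv_lhs => rw [← List.take_append_drop k (f.toList.drop 14), ← ht]
        rfl
      have hnos : '/' ∉ (f.toList.drop 14).take k := by
        intro hmem
        obtain ⟨i, hi, hieq⟩ := List.mem_iff_getElem.mp hmem
        have hlt : i < min k (f.toList.drop 14).length := by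
          simpa [List.length_take] using hi
        have hik : i < k := lt_of_lt_of_le hlt (min_le_left _ _)
        have hilen : i < (f.toList.drop 14).length := lt_of_lt_of_le hlt (min_le_right _ _)
        apply hmin i hik
        rw [List.drop_eq_getElem_cons hilen]
        have hgc : (f.toList.drop 14)[i] = '/' := by
          rw [← hieq]
          exact (List.getElem_take).symm
        rw [hgc]
        exact ⟨_, rfl⟩
      set segS := PySem.Str.slice (PySem.Str.slice f (some 14) none) none
          (some (PySem.Str.find (PySem.Str.slice f (some 14) none) "/")) with hsegdef
      have hseg : segS.toList = (f.toList.drop 14).take k := by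
        rw [hsegdef]
        simp only [PySem.Str.toList_slice, PySem.Chars.slice_eq_listSlice, hrestStr, hfind]
        rw [PySem.List.slice_to _ hneg]
      have e1 := startswith_role f "ansible/roles/system_user/" "system_user" segS _ _ t (by decide) (by decide) hcs hsplit hnos hseg
      have e2 := startswith_role f "ansible/roles/storage/" "storage" segS _ _ t (by decide) (by decide) hcs hsplit hnos hseg
      have e3 := startswith_role f "ansible/roles/docker/" "docker" segS _ _ t (by decide) (by decide) hcs hsplit hnos hseg
      have e4 := startswith_role f "ansible/roles/tailscale/" "tailscale" segS _ _ t (by decide) (by decide) hcs hsplit hnos hseg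
      have e5 := startswith_role f "ansible/roles/glusterfs/" "glusterfs" segS _ _ t (by decide) (by decide) hcs hsplit hnos hseg
      have e6 := startswith_role f "ansible/roles/swarm/" "swarm" segS _ _ t (by decide) (by decide) hcs hsplit hnos hseg
      have e7 := startswith_role f "ansible/roles/portainer_bootstrap/" "portainer_bootstrap" segS _ _ t (by decide) (by decide) hcs hsplit hnos hseg
      have e8 := startswith_role f "ansible/roles/runtime_sync/" "runtime_sync" segS _ _ t (by decide) (by decide) hcs hsplit hnos hseg
      have hsw2 := hsw
      simp only [PySem.Str.startswith_eq] at hsw2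
      simp at hsw2
      have hfneg : ¬ (PySem.Chars.find (PySem.List.slice f.toList (some 14) none) ['/'] < 0) := by
        rw [hslice]; omega
      have htag : tagOf f = PySem.Dict.get? roleTag segS := by
        simp [tagOf, hsw2, hfneg, hsegdef]
      rw [htag]
      have he : ∀ x ∈ roleTriples, PySem.Str.startswith f x.1 = (x.2.1 == segS) := by
        intro x hx
        simp only [roleTriples, List.mem_cons, List.not_mem_nil, or_false] at hx
        rcases hx with rfl | rfl | rfl | rfl | rfl | rfl | rfl | rfl
        · exact e1
        · exact e2
        · exact e3
        · exact e4
        · exact e5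
        · exact e6
        · exact e7
        · exact e8
      have hARole : rolePhaseMap = roleTriples.map (fun x => (x.1, x.2.2)) := by decide
      have hBItems : roleTag.items = roleTriples.map (fun x => x.2) := by decide
      rw [hARole, chain f segS tags roleTriples he, ← hBItems]
      simp only [PySem.Dict.get?]
  · have hf := Bool.eq_false_iff.mpr hsw
    have h1 := sw_mono f "ansible/roles/system_user/" (by decide) hf
    have h2 := sw_mono f "ansible/roles/storage/" (by decide) hf
    have h3 := sw_mono f "ansible/roles/docker/" (by decide) hf
    have h4 := sw_mono f "ansible/roles/tailscale/" (by decide) hf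
    have h5 := sw_mono f "ansible/roles/glusterfs/" (by decide) hf
    have h6 := sw_mono f "ansible/roles/swarm/" (by decide) hf
    have h7 := sw_mono f "ansible/roles/portainer_bootstrap/" (by decide) hf
    have h8 := sw_mono f "ansible/roles/runtime_sync/" (by decide) hf
    simp only [PySem.Str.startswith_eq] at hf h1 h2 h3 h4 h5 h6 h7 h8
    simp at hf h1 h2 h3 h4 h5 h6 h7 h8
    simp [rolePhaseMap, aInner, tagOf, hf, h1, h2, h3, h4, h5, h6, h7, h8]

-- A's second loop = bail on any unparsable file, else fold the tags into an ordered set.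
theorem aLoop_char (files : List String) : ∀ tags, aLoop files tags =
    if none ∈ files.map tagOf then ""
    else PySem.Str.join "," ((files.filterMap tagOf).foldl PySem.Set.add tags) := by
  induction files with
  | nil => intro tags; simp [aLoop]
  | cons f rest ih =>
      intro tags
      rw [aLoop, aInner_eq_tagOf]
      cases h : tagOf f with
      | none => simp [h]
      | some t =>
          simp only [h, List.map_cons, List.filterMap_cons]
          rw [ih]
          simp [PySem.Set.add, PySem.Set.contains, List.foldl_cons]

-- ===== VERDICT (by name: the statement is the Claim_ definition above) =====
theorem compute_ansible_tags_spec : Claim_equal_compute_ansible_tags := by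
  intro changed_files _
  unfold Spec_compute_ansible_tags compute_ansible_tags compute_ansible_tags_alt
  by_cases hnil : changed_files = []
  · simp [hnil]
  · rw [if_neg hnil, if_neg hnil]
    by_cases hpre : aPrecheck changed_files = true
    · rw [if_pos hpre, aLoop_char]
      have hmb : (changed_files.map tagOf).filterMap id = changed_files.filterMap tagOf := by
        rw [List.filterMap_map]; rfl
      simp only [hmb, PySem.List.dedup_eq_ofList, PySem.Set.ofList_eq_foldl]
    · rw [if_neg hpre]
      -- some file fails the root check, hence its tagOf is none
      rw [aPrecheck_eq] at hpre
      simp only [List.all_eq_true, not_forall] at hpre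
      obtain ⟨f, hfmem, hfsw⟩ := hpre
      have : tagOf f = none := by
        simp only [tagOf]
        rw [if_neg (by simpa using hfsw)]
      have hn : none ∈ changed_files.map tagOf := by
        simpa [List.mem_map] using ⟨f, hfmem, this⟩
      simp [hn]
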